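-- pv_equiv track=rewrite | github.com/wzj042/sooon-about-dev | app/sooon-battle-simulate/script/merge_json.py | clean_contained_options
-- ===== SOURCE A (Python) =====
-- from typing import Dict, List, Any, Tuple
--
-- def clean_contained_options(options: List[str]) -> List[str]:
--     """
--     清理包含其余选项文本的选项
--
--     Args:
--         options: 原始选项列表
--
--     Returns:
--         List[str]: 清理后的选项列表
--     """
--     if len(options) < 2:
--         return options
--
--     # 按长度排序，长的在前，短的在后
--     sorted_options = sorted(options, key=len, reverse=True)
--
--     cleaned = []
--     for option in sorted_options:
--         # 检查当前选项是否包含其他已保留的选项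
--         is_redundant = False
--         for kept_option in cleaned:
--             if kept_option in option and kept_option != option:
--                 is_redundant = True
--                 break
--
--         # 如果当前选项不包含其他已保留的选项，则保留
--         if not is_redundant:
--             cleaned.append(option)
--
--     return cleaned if cleaned else options
-- ===== SOURCE B (Python) =====
-- def clean_contained_options(options):
--     # A's containment filter can never remove anything (a kept option is always
--     # at least as long as a later one, and equal strings are excluded), so the
--     # result is just the stable length-descending sort of the input.
--     return sorted(options, key=len, reverse=True)
-- ===== Notes on version B (the rewrite author's own statement) =====
-- stated objective: faster
-- what changed: A's nested containment-removal loop is a no-op (a kept option is always at least as long as later ones, and equal-length containment means equality, which the kept_option != option test excludes), so B drops the whole filtering pass and returns the stable length-descending sort directly.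
import Mathlib
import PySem

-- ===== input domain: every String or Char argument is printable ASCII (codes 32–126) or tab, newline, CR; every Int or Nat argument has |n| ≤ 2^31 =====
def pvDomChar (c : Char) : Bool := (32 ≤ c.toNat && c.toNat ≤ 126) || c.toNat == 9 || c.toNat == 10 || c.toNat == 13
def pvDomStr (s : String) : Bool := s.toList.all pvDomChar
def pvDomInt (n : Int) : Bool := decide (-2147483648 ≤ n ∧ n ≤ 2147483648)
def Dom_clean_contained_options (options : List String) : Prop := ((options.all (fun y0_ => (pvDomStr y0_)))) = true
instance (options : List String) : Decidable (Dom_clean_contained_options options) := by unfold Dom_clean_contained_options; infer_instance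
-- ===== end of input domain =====

-- B drops A's no-op containment-filter pass and returns the stable length-descending sort directly (simpler).


-- ===== PORT A =====
def clean_contained_options (options : List String) : List String :=
  if options.length < 2 then options
  else
    let sorted_options := PySem.List.sorted options (fun s => PySem.Str.len s) true
    let cleaned := sorted_options.foldl (fun cleaned option =>
      -- inner 'for kept_option in cleaned: … break' sets is_redundant iff some kept matches
      let is_redundant := cleaned.any (fun kept => PySem.Str.isIn kept option && kept != option)
      if !is_redundant then cleaned ++ [option] else cleaned) []
    if cleaned ≠ [] then cleaned else options

-- ===== PORT B =====
def clean_contained_options_alt (options : List String) : List String :=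
  PySem.List.sorted options (fun s => PySem.Str.len s) true

-- ===== PRECONDITION & SPEC =====
def Spec_clean_contained_options (options : List String) (out : List String) : Prop := out = clean_contained_options_alt options
instance (options : List String) (out : List String) : Decidable (Spec_clean_contained_options options out) := by unfold Spec_clean_contained_options; infer_instance

-- ===== CLAIM (what is proved, stated in full; the proofs are below) =====
def Claim_equal_clean_contained_options : Prop := ∀ (options : List String), Dom_clean_contained_options options → Spec_clean_contained_options options (clean_contained_options options)

-- ===== LEMMAS AND PROOFS =====

-- A kept string at least as long as `option` can only be a substring of it by being equal to it,
-- so the redundancy test is false on every element of `cleaned`.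
theorem pv_check_false (cleaned : List String) (option : String)
    (h : ∀ k ∈ cleaned, PySem.Str.len option ≤ PySem.Str.len k) :
    cleaned.any (fun kept => PySem.Str.isIn kept option && kept != option) = false := by
  rw [List.any_eq_false]
  intro kept hk
  simp only [Bool.and_eq_true, bne_iff_ne, not_and, ne_eq, not_not]
  intro hin
  have hinf := (PySem.Str.isIn_iff_infix kept option).mp hin
  have hlen : option.toList.length ≤ kept.toList.length := by
    have := h kept hk
    simpa [PySem.Str.len_eq] using this
  exact String.toList_inj.mp (List.IsInfix.eq_of_length_le hinf hlen)

-- The filtering fold appends every element when the list is length-descending.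
theorem pv_fold_id (l : List String) (acc : List String)
    (hp : l.Pairwise (fun a b => PySem.Str.len b ≤ PySem.Str.len a))
    (hacc : ∀ k ∈ acc, ∀ y ∈ l, PySem.Str.len y ≤ PySem.Str.len k) :
    l.foldl (fun cleaned option =>
      let is_redundant := cleaned.any (fun kept => PySem.Str.isIn kept option && kept != option)
      if !is_redundant then cleaned ++ [option] else cleaned) acc = acc ++ l := by
  induction l generalizing acc with
  | nil => simp
  | cons x t ih =>
    rcases List.pairwise_cons.mp hp with ⟨hx, ht⟩
    have hred := pv_check_false acc x (fun k hk => hacc k hk x (by simp))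
    simp only [List.foldl_cons, hred, Bool.not_false, if_true]
    have hacc' : ∀ k ∈ acc ++ [x], ∀ y ∈ t, PySem.Str.len y ≤ PySem.Str.len k := by
      intro k hk y hy
      rcases List.mem_append.mp hk with hk | hk
      · exact hacc k hk y (by simp [hy])
      · simp at hk; subst hk; exact hx y hy
    rw [show acc ++ x :: t = (acc ++ [x]) ++ t by simp]
    exact ih (acc ++ [x]) ht hacc'

-- ===== VERDICT (by name: the statement is the Claim_ definition above) =====
theorem clean_contained_options_spec : Claim_equal_clean_contained_options := by
  intro options _
  unfold Spec_clean_contained_options clean_contained_options clean_contained_options_alt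
  by_cases hlen : options.length < 2
  · simp only [hlen, if_true]
    match options, hlen with
    | [], _ => rfl
    | [x], _ => exact (PySem.List.sorted_rev_eq_self_of_pairwise [x] _ (by simp)).symm
  · simp only [hlen, if_false]
    have hfold := pv_fold_id (PySem.List.sorted options (fun s => PySem.Str.len s) true) []
      (PySem.List.sorted_pairwise_rev options _) (by simp)
    have hne : PySem.List.sorted options (fun s => PySem.Str.len s) true ≠ [] := by
      intro h
      have := (PySem.List.sorted_perm options (fun s => PySem.Str.len s) true).length_eq
      rw [h] at this
      simp at this
      omega
    rw [hfold, List.nil_append, if_pos hne]
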